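-- pv_equiv track=rewrite | github.com/OlegsBrown/bd | ConceptFind.py | apply_winnowing
-- ===== SOURCE A (Python) =====
-- def apply_winnowing(hashes, win_size):
--     fingerprints = set()
--     if len(hashes) < win_size:
--         fingerprints.update(hashes)
--         return fingerprints
--     for i in range(len(hashes)-win_size+1):
--         fingerprints.add(min(hashes[i:i+win_size]))
--     return fingerprints
-- ===== SOURCE B (Python) =====
-- def apply_winnowing(hashes, win_size):
--     fingerprints = set()
--     n = len(hashes)
--     if n < win_size:
--         fingerprints.update(hashes)
--         return fingerprints
--     # prefix minima within aligned blocks of length win_size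
--     pref = []
--     for i in range(n):
--         if i % win_size == 0:
--             pref.append(hashes[i])
--         else:
--             pref.append(min(pref[-1], hashes[i]))
--     # suffix minima within aligned blocks, built right-to-left then reversed
--     suff_rev = []
--     for i in range(n - 1, -1, -1):
--         if i % win_size == win_size - 1 or i == n - 1:
--             suff_rev.append(hashes[i])
--         else:
--             suff_rev.append(min(suff_rev[-1], hashes[i]))
--     suff = suff_rev[::-1]
--     # each window [i, i+win_size) spans at most two blocks
--     for i in range(n - win_size + 1):
--         fingerprints.add(min(suff[i], pref[i + win_size - 1]))
--     return fingerprints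
-- ===== Notes on version B (the rewrite author's own statement) =====
-- stated objective: faster
-- what changed: Replaces A's recomputation of min over a fresh slice for every window with precomputed per-block prefix and suffix minima (the classic two-pass sliding-window minimum), so each window minimum becomes a min of two table lookups.
import Mathlib
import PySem

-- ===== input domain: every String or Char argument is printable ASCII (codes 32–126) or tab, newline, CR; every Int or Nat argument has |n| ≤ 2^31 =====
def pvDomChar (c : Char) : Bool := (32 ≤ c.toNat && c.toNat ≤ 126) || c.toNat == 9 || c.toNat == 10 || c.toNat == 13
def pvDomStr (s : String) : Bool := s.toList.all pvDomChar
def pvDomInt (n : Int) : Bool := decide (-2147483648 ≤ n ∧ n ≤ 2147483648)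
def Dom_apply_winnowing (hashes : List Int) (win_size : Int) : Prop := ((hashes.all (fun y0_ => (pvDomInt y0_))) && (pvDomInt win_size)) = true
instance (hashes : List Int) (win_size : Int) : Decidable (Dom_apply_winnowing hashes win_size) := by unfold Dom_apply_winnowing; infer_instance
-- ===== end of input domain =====

-- B replaces A's per-window min over a fresh slice by block prefix/suffix minima
-- (the classic two-pass sliding-window minimum), O(n) instead of O(n*win_size).


-- ===== PORT A =====
-- literal transliteration of A; min of an empty window slice (win_size ≤ 0) is Python's
-- ValueError = min? returning none; that case is excluded by Pre_, so .getD 0 is unreachable there.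
def apply_winnowing (hashes : List Int) (win_size : Int) : List Int :=
  let fingerprints : PySem.Set Int := PySem.Set.empty
  if (hashes.length : Int) < win_size then
    PySem.Set.update fingerprints hashes
  else
    (PySem.List.pyRange 0 ((hashes.length : Int) - win_size + 1) 1).foldl
      (fun fp i =>
        PySem.Set.add fp
          ((PySem.List.min? (PySem.List.slice hashes (some i) (some (i + win_size))) (fun x => x)).getD 0))
      fingerprints

-- ===== PORT B =====
-- literal transliteration of Source B (block prefix/suffix minima); list indexing is the
-- total pyGetD: every index Source B uses is in range under Pre_.
def apply_winnowing_alt (hashes : List Int) (win_size : Int) : List Int :=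
  let fingerprints : PySem.Set Int := PySem.Set.empty
  let n : Int := hashes.length
  if n < win_size then
    PySem.Set.update fingerprints hashes
  else
    let pref : List Int :=
      (PySem.List.pyRange 0 n 1).foldl
        (fun p i =>
          if PySem.Int.mod i win_size == 0 then
            p ++ [PySem.List.pyGetD hashes i 0]
          else
            p ++ [min (PySem.List.pyGetD p (-1) 0) (PySem.List.pyGetD hashes i 0)]) []
    let suff_rev : List Int :=
      (PySem.List.pyRange (n - 1) (-1) (-1)).foldl
        (fun s i =>
          if PySem.Int.mod i win_size == win_size - 1 || i == n - 1 then
            s ++ [PySem.List.pyGetD hashes i 0]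
          else
            s ++ [min (PySem.List.pyGetD s (-1) 0) (PySem.List.pyGetD hashes i 0)]) []
    let suff : List Int := (PySem.List.slice? suff_rev none none (-1)).getD []
    (PySem.List.pyRange 0 (n - win_size + 1) 1).foldl
      (fun fp i =>
        PySem.Set.add fp
          (min (PySem.List.pyGetD suff i 0) (PySem.List.pyGetD pref (i + win_size - 1) 0)))
      fingerprints

-- ===== PRECONDITION & SPEC =====
-- A raises ValueError (min of an empty window slice) exactly when win_size ≤ 0; Pre_ excludes only that.
def Pre_apply_winnowing (hashes : List Int) (win_size : Int) : Prop := 1 ≤ win_size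
instance (hashes : List Int) (win_size : Int) : Decidable (Pre_apply_winnowing hashes win_size) := by unfold Pre_apply_winnowing; infer_instance
def pvWitness_apply_winnowing : List Int × Int := ([3, 1, 4, 1, 5], 2)
def Spec_apply_winnowing (hashes : List Int) (win_size : Int) (out : List Int) : Prop := out = apply_winnowing_alt hashes win_size
instance (hashes : List Int) (win_size : Int) (out : List Int) : Decidable (Spec_apply_winnowing hashes win_size out) := by unfold Spec_apply_winnowing; infer_instance

-- ===== CLAIM =====
def Claim_equal_apply_winnowing : Prop := ∀ (hashes : List Int) (win_size : Int), Dom_apply_winnowing hashes win_size → Pre_apply_winnowing hashes win_size → Spec_apply_winnowing hashes win_size (apply_winnowing hashes win_size)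

-- ===== LEMMAS AND PROOFS =====

-- min of the segment h[a:b) (0 if empty): the value Python's min(h[a:b]) returns
def wmin (h : List Int) (a b : Nat) : Int :=
  match (h.drop a).take (b - a) with
  | [] => 0
  | x :: t => t.foldl min x

theorem foldl_min_comm (u : List Int) (x y : Int) :
    u.foldl min (min x y) = min x (u.foldl min y) := by
  induction u generalizing y with
  | nil => rfl
  | cons z u ih => simp only [List.foldl_cons, min_assoc, ih]

theorem foldl_min_append (t u : List Int) (x y : Int) :
    (t ++ y :: u).foldl min x = min (t.foldl min x) (u.foldl min y) := by
  induction t generalizing x with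
  | nil => simpa using foldl_min_comm u x y
  | cons z t ih => simp only [List.cons_append, List.foldl_cons, ih]

theorem wmin_single (h : List Int) (m : Nat) (hm : m < h.length) :
    wmin h m (m + 1) = h.getD m 0 := by
  unfold wmin
  rw [show m + 1 - m = 1 by omega, List.drop_eq_getElem_cons hm]
  simp only [List.take_succ_cons, List.take_zero, List.foldl_nil]
  simp [List.getD_eq_getElem?_getD, List.getElem?_eq_getElem hm]

theorem wmin_split (h : List Int) (a b c : Nat) (hab : a < b) (hbc : b < c)
    (hb : b < h.length) : min (wmin h a b) (wmin h b c) = wmin h a c := by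
  have h1 : (h.drop a).take (c - a) = (h.drop a).take (b - a) ++ (h.drop b).take (c - b) := by
    rw [show c - a = (b - a) + (c - b) by omega, List.take_add]
    congr 1
    rw [List.drop_drop, show a + (b - a) = b by omega]
  obtain ⟨x, t1, e1⟩ : ∃ x t, (h.drop a).take (b - a) = x :: t := by
    cases hd : (h.drop a).take (b - a) with
    | nil => exfalso; have := congrArg List.length hd; simp at this; omega
    | cons x t => exact ⟨x, t, rfl⟩
  obtain ⟨y, t2, e2⟩ : ∃ y t, (h.drop b).take (c - b) = y :: t := by
    cases hd : (h.drop b).take (c - b) with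
    | nil => exfalso; have := congrArg List.length hd; simp at this; omega
    | cons y t => exact ⟨y, t, rfl⟩
  unfold wmin
  rw [h1, e1, e2]
  simp only [List.cons_append]
  exact (foldl_min_append t1 t2 x y).symm

theorem mul_add_mod_lt (wn q s : Nat) (hs : s < wn) : (wn * q + s) % wn = s := by
  rw [Nat.mul_add_mod, Nat.mod_eq_of_lt hs]

theorem mod_pred (k wn : Nat) (h : 1 ≤ wn) (h0 : k % wn ≠ 0) : (k - 1) % wn = k % wn - 1 := by
  have e := Nat.div_add_mod k wn
  have hlt := Nat.mod_lt k (show 0 < wn by omega)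
  rw [show k - 1 = wn * (k / wn) + (k % wn - 1) by omega]
  exact mul_add_mod_lt wn (k / wn) _ (by omega)

theorem mod_last (k wn : Nat) (h : 1 ≤ wn) (h0 : k % wn = 0) : (k + wn - 1) % wn = wn - 1 := by
  have e := Nat.div_add_mod k wn
  rw [show k + wn - 1 = wn * (k / wn) + (wn - 1) by omega]
  exact mul_add_mod_lt wn (k / wn) (wn - 1) (by omega)

theorem mod_last' (k wn : Nat) (h : 1 ≤ wn) (h0 : k % wn ≠ 0) : (k + wn - 1) % wn = k % wn - 1 := by
  have e := Nat.div_add_mod k wn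
  have hlt := Nat.mod_lt k (show 0 < wn by omega)
  rw [show k + wn - 1 = wn * (k / wn + 1) + (k % wn - 1) by ring_nf; omega]
  exact mul_add_mod_lt wn _ _ (by omega)

theorem mod_succ (k wn : Nat) (hlt : k % wn + 1 < wn) : (k + 1) % wn = k % wn + 1 := by
  have e := Nat.div_add_mod k wn
  rw [show k + 1 = wn * (k / wn) + (k % wn + 1) by omega]
  exact mul_add_mod_lt wn _ _ hlt

theorem pyGetD_neg_one (p : List Int) (h : p ≠ []) :
    PySem.List.pyGetD p (-1) 0 = p.getD (p.length - 1) 0 := by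
  have hl : 0 < p.length := List.length_pos_iff.mpr h
  simp only [PySem.List.pyGetD, PySem.List.pyGet?, PySem.List.pyIdx?]
  rw [if_neg (by omega), if_pos (by omega : -(p.length : Int) ≤ -1)]
  simp [List.getD_eq_getElem?_getD]

theorem getD_reverse (l : List Int) (k : Nat) (hk : k < l.length) :
    l.reverse.getD k 0 = l.getD (l.length - 1 - k) 0 := by
  rw [List.getD_eq_getElem?_getD, List.getD_eq_getElem?_getD, List.getElem?_reverse hk]

theorem pyRange_neg_one_append (a b : Int) (hb : b < a) :
    PySem.List.pyRange a b (-1) = PySem.List.pyRange a (b + 1) (-1) ++ [b + 1] := by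
  rw [PySem.List.pyRange_neg_one_eq_reverse, PySem.List.pyRange_one_cons (by omega),
    List.reverse_cons, PySem.List.pyRange_neg_one_eq_reverse]

-- the body of Source B's first loop
def prefStep (h : List Int) (wn : Nat) (p : List Int) (i : Int) : List Int :=
  if PySem.Int.mod i (wn : Int) == 0 then p ++ [PySem.List.pyGetD h i 0]
  else p ++ [min (PySem.List.pyGetD p (-1) 0) (PySem.List.pyGetD h i 0)]

def prefAux (h : List Int) (wn : Nat) (m : Nat) : List Int :=
  (PySem.List.pyRange 0 (m : Int) 1).foldl (prefStep h wn) []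

theorem prefAux_succ (h : List Int) (wn : Nat) (m : Nat) :
    prefAux h wn (m + 1) = prefStep h wn (prefAux h wn m) (m : Int) := by
  unfold prefAux
  rw [show ((m + 1 : Nat) : Int) = (m : Int) + 1 by push_cast; ring,
    PySem.List.pyRange_one_succ_right (by positivity), List.foldl_append]
  rfl

theorem pref_spec (h : List Int) (wn : Nat) (hw : 1 ≤ wn) (m : Nat) (hm : m ≤ h.length) :
    (prefAux h wn m).length = m ∧
    ∀ k < m, (prefAux h wn m).getD k 0 = wmin h (k - k % wn) (k + 1) := by
  induction m with
  | zero =>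
    constructor
    · simp [prefAux, PySem.List.pyRange_one_eq_nil (le_refl 0)]
    · intro k hk; omega
  | succ m ih =>
    obtain ⟨ihl, ihv⟩ := ih (by omega)
    rw [prefAux_succ]
    unfold prefStep
    rw [PySem.Int.mod_natCast, PySem.List.pyGetD_natCast]
    by_cases hr : m % wn = 0
    · rw [if_pos (by simp [hr])]
      refine ⟨by simp [ihl], ?_⟩
      intro k hk
      by_cases hkm : k < m
      · rw [List.getD_append _ _ _ _ (by omega), ihv k hkm]
      · have hkm' : k = m := by omega
        subst hkm'
        rw [List.getD_append_right _ _ _ _ (by omega), ihl]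
        simp only [Nat.sub_self, List.getD]
        rw [hr, Nat.sub_zero, wmin_single h k (by omega)]
        simp [List.getD_eq_getElem?_getD]
    · rw [if_neg (by simp only [beq_iff_eq, Int.natCast_eq_zero]; exact hr)]
      have hm1 : 1 ≤ m := by
        rcases Nat.eq_zero_or_pos m with h0 | h1
        · exfalso; apply hr; simp [h0]
        · omega
      have hne : prefAux h wn m ≠ [] := by
        intro hc; rw [hc] at ihl; simp at ihl; omega
      refine ⟨by simp [ihl], ?_⟩
      intro k hk
      by_cases hkm : k < m
      · rw [List.getD_append _ _ _ _ (by omega), ihv k hkm]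
      · have hkm' : k = m := by omega
        subst hkm'
        rw [List.getD_append_right _ _ _ _ (by omega), ihl]
        simp only [Nat.sub_self, List.getD]
        rw [pyGetD_neg_one _ hne, ihl, ihv (k - 1) (by omega),
          show k - 1 + 1 = k by omega, mod_pred k wn hw hr]
        have hmod := Nat.mod_lt k (show 0 < wn by omega)
        have hm0 : 1 ≤ k % wn := by omega
        rw [show k - 1 - (k % wn - 1) = k - k % wn by omega]
        rw [← wmin_split h (k - k % wn) k (k + 1) (by omega) (by omega) (by omega),
          wmin_single h k (by omega)]
        simp [List.getD_eq_getElem?_getD]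

-- the body of Source B's second loop
def suffStep (h : List Int) (wn N : Nat) (s : List Int) (i : Int) : List Int :=
  if PySem.Int.mod i (wn : Int) == (wn : Int) - 1 || i == (N : Int) - 1 then
    s ++ [PySem.List.pyGetD h i 0]
  else s ++ [min (PySem.List.pyGetD s (-1) 0) (PySem.List.pyGetD h i 0)]

def suffAux (h : List Int) (wn N t : Nat) : List Int :=
  (PySem.List.pyRange ((N : Int) - 1) (((N - t : Nat) : Int) - 1) (-1)).foldl (suffStep h wn N) []

theorem suffAux_succ (h : List Int) (wn N t : Nat) (ht : t < N) :
    suffAux h wn N (t + 1) = suffStep h wn N (suffAux h wn N t) ((N - t - 1 : Nat) : Int) := by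
  unfold suffAux
  rw [pyRange_neg_one_append ((N : Int) - 1) (((N - (t + 1) : Nat) : Int) - 1) (by omega),
    show (((N - (t + 1) : Nat) : Int) - 1) + 1 = ((N - t - 1 : Nat) : Int) by omega,
    show ((N - t - 1 : Nat) : Int) = ((N - t : Nat) : Int) - 1 by omega,
    List.foldl_append]
  rw [show ((N - t : Nat) : Int) - 1 = ((N - t - 1 : Nat) : Int) by omega]
  rfl

theorem suff_spec (h : List Int) (wn : Nat) (hw : 1 ≤ wn) (t : Nat) (ht : t ≤ h.length) :
    (suffAux h wn h.length t).length = t ∧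
    ∀ k, h.length - t ≤ k → k < h.length →
      (suffAux h wn h.length t).getD (h.length - 1 - k) 0
        = wmin h k (min (k - k % wn + wn) h.length) := by
  induction t with
  | zero =>
    constructor
    · simp [suffAux]
    · intro k hk1 hk2; omega
  | succ t ih =>
    obtain ⟨ihl, ihv⟩ := ih (by omega)
    rw [suffAux_succ h wn h.length t (by omega)]
    set N := h.length with hN
    set j := N - t - 1 with hj
    unfold suffStep
    rw [PySem.Int.mod_natCast, PySem.List.pyGetD_natCast]
    have hjN : j < N := by omega
    have hmod := Nat.mod_lt j (show 0 < wn by omega)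
    have hjr : j % wn ≤ j := Nat.mod_le j wn
    by_cases hc : j % wn = wn - 1 ∨ j = N - 1
    · rw [if_pos (by
        rcases hc with hc | hc
        · apply Bool.or_eq_true_iff.mpr; left
          simp only [beq_iff_eq]; omega
        · apply Bool.or_eq_true_iff.mpr; right
          simp only [beq_iff_eq]; omega)]
      refine ⟨by simp [ihl], ?_⟩
      intro k hk1 hk2
      by_cases hkj : j < k
      · rw [List.getD_append _ _ _ _ (by omega), ihv k (by omega) hk2]
      · have hkj' : k = j := by omega
        subst hkj'
        rw [List.getD_append_right _ _ _ _ (by omega), ihl]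
        rw [show N - 1 - j - t = 0 by omega]
        simp only [List.getD]
        have e1 : min (j - j % wn + wn) N = j + 1 := by
          rcases hc with hc | hc
          · omega
          · omega
        rw [e1, wmin_single h j (by omega)]
        simp [List.getD_eq_getElem?_getD]
    · push_neg at hc
      obtain ⟨hc1, hc2⟩ := hc
      rw [if_neg (by
        simp only [Bool.or_eq_true, beq_iff_eq]
        push_neg
        constructor
        · omega
        · omega)]
      have ht1 : 1 ≤ t := by omega
      have hne : suffAux h wn N t ≠ [] := by
        intro hx; rw [hx] at ihl; simp at ihl; omega
      refine ⟨by simp [ihl], ?_⟩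
      intro k hk1 hk2
      by_cases hkj : j < k
      · rw [List.getD_append _ _ _ _ (by omega), ihv k (by omega) hk2]
      · have hkj' : k = j := by omega
        subst hkj'
        rw [List.getD_append_right _ _ _ _ (by omega), ihl,
          show N - 1 - j - t = 0 by omega]
        simp only [List.getD]
        rw [pyGetD_neg_one _ hne, ihl,
          show t - 1 = N - 1 - (j + 1) by omega,
          ihv (j + 1) (by omega) (by omega),
          mod_succ j wn (by omega),
          show j + 1 - (j % wn + 1) + wn = j - j % wn + wn by omega]
        have hc' : j + 1 < min (j - j % wn + wn) N := by omega
        rw [← wmin_split h j (j + 1) (min (j - j % wn + wn) N) (by omega) hc' (by omega),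
          wmin_single h j (by omega)]
        rw [min_comm]
        simp [List.getD_eq_getElem?_getD]

-- ===== VERDICT =====
theorem apply_winnowing_spec : Claim_equal_apply_winnowing := by
  intro hashes win_size _ hpre
  unfold Pre_apply_winnowing at hpre
  unfold Spec_apply_winnowing
  obtain ⟨wn, rfl⟩ : ∃ wn : Nat, win_size = (wn : Int) := ⟨win_size.toNat, by omega⟩
  have hw : 1 ≤ wn := by omega
  simp only [apply_winnowing, apply_winnowing_alt]
  set N := hashes.length with hN
  by_cases hcase : (N : Int) < (wn : Int)
  · rw [if_pos hcase, if_pos hcase]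
  · rw [if_neg hcase, if_neg hcase]
    have hwN : wn ≤ N := by omega
    have hpref : (PySem.List.pyRange 0 (N : Int) 1).foldl
        (fun p i =>
          if PySem.Int.mod i (wn : Int) == 0 then p ++ [PySem.List.pyGetD hashes i 0]
          else p ++ [min (PySem.List.pyGetD p (-1) 0) (PySem.List.pyGetD hashes i 0)]) []
        = prefAux hashes wn N := rfl
    have hsuffr : (PySem.List.pyRange ((N : Int) - 1) (-1) (-1)).foldl
        (fun s i =>
          if PySem.Int.mod i (wn : Int) == (wn : Int) - 1 || i == (N : Int) - 1 then
            s ++ [PySem.List.pyGetD hashes i 0]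
          else s ++ [min (PySem.List.pyGetD s (-1) 0) (PySem.List.pyGetD hashes i 0)]) []
        = suffAux hashes wn N N := by
      unfold suffAux
      rw [show (((N - N : Nat) : Int) - 1) = (-1 : Int) by omega]
      rfl
    rw [hpref, hsuffr, PySem.List.slice?_none_none_neg_one, Option.getD_some]
    apply PySem.List.foldl_congr_mem
    intro acc i hi
    obtain ⟨hi0, hi1⟩ := PySem.List.mem_pyRange_one.mp hi
    obtain ⟨k, rfl⟩ : ∃ k : Nat, i = (k : Int) := ⟨i.toNat, by omega⟩
    have hkN : k + wn ≤ N := by omega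
    congr 1
    -- A's value for this window
    obtain ⟨x, t, e⟩ : ∃ x t, (hashes.drop k).take wn = x :: t := by
      cases hd : (hashes.drop k).take wn with
      | nil => exfalso; have := congrArg List.length hd; simp at this; omega
      | cons x t => exact ⟨x, t, rfl⟩
    rw [PySem.List.slice_natCast_add, e, PySem.List.min?_id_cons, Option.getD_some]
    have hA : t.foldl min x = wmin hashes k (k + wn) := by
      unfold wmin
      rw [show k + wn - k = wn by omega, e]
    rw [hA]
    -- B's value for this window
    obtain ⟨sl, sv⟩ := suff_spec hashes wn hw N (le_refl N)
    obtain ⟨pl, pv⟩ := pref_spec hashes wn hw N (le_refl N)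
    rw [← hN] at sl sv
    rw [PySem.List.pyGetD_natCast, show ((k : Int) + (wn : Int) - 1) = ((k + wn - 1 : Nat) : Int) by omega,
      PySem.List.pyGetD_natCast]
    rw [getD_reverse _ k (by rw [sl]; omega), sl,
      sv k (by omega) (by omega),
      pv (k + wn - 1) (by omega)]
    have hmod := Nat.mod_lt k (show 0 < wn by omega)
    have hkr : k % wn ≤ k := Nat.mod_le k wn
    by_cases hr : k % wn = 0
    · rw [mod_last (k := k) (wn := wn) hw hr,
        show k + wn - 1 - (wn - 1) = k by omega,
        show k + wn - 1 + 1 = k + wn by omega,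
        show min (k - k % wn + wn) N = k + wn by omega,
        min_self]
    · rw [mod_last' (k := k) (wn := wn) hw hr,
        show k + wn - 1 - (k % wn - 1) = k - k % wn + wn by omega,
        show k + wn - 1 + 1 = k + wn by omega,
        show min (k - k % wn + wn) N = k - k % wn + wn by omega]
      have h1 : k % wn ≥ 1 := by omega
      exact (wmin_split hashes k (k - k % wn + wn) (k + wn) (by omega) (by omega) (by omega)).symm
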